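-- pv_equiv track=rewrite | github.com/gistable/gistable | all-gists/bd0940f7988774e2822d/snippet.py | process
-- ===== SOURCE A (Python) =====
-- def process(line, keys=[], not_blank_keys=[]):
--     fields = line.split('`')
--     output_lst = [''] * len(keys)
--     try:
--         for field in fields:
--             key, val = field.split('=', 1)
--             if key in keys:
--                 output_lst[keys.index(key)] = val
--         for not_blank_key in not_blank_keys:
--             if not output_lst[keys.index(not_blank_key)]:
--                 return
--     except:
--         return
--     return '\t'.join(output_lst)
-- ===== SOURCE B (Python) =====
-- def process(line, keys=[], not_blank_keys=[]):
--     # Build key->val dict first (last occurrence wins), then fill the output slots.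
--     d = {}
--     for field in line.split('`'):
--         try:
--             key, val = field.split('=', 1)
--         except ValueError:
--             return
--         d[key] = val
--     output_lst = [''] * len(keys)
--     for k, v in d.items():
--         if k in keys:
--             output_lst[keys.index(k)] = v
--     for not_blank_key in not_blank_keys:
--         try:
--             i = keys.index(not_blank_key)
--         except ValueError:
--             return
--         if not output_lst[i]:
--             return
--     return '\t'.join(output_lst)
-- ===== Notes on version B (the rewrite author's own statement) =====
-- stated objective: alternative
-- what changed: B first collects all fields into a dict (last occurrence wins) and only then fills the output slots from the dict's items, instead of A's single interleaved loop assigning into the output list per field.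
import Mathlib
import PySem

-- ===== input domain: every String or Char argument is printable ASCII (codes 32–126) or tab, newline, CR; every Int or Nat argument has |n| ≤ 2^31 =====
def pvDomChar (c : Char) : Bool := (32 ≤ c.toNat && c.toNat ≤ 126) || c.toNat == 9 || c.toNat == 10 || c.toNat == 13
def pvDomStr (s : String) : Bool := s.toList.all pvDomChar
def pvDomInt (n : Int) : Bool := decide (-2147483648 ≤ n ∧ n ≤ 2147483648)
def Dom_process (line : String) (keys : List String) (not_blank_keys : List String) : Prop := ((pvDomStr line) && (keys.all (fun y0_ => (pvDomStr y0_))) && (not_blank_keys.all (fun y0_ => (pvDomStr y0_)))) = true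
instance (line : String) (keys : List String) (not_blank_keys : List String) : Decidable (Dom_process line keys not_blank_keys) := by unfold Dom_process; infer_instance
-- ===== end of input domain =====

-- B builds a dict of all fields first (last occurrence wins) and then fills the output slots
-- from its items; A assigns into the output list field by field in one interleaved loop.

-- shared transliteration of the line both Pythons contain:
-- "if key in keys: output_lst[keys.index(key)] = val"
def pvStep (keys : List String) (out : List String) (k v : String) : List String :=
  if k ∈ keys then
    match PySem.List.index? keys k with
    | some i => out.set i v
    | none => out
  else out

-- shared transliteration of the final not_blank loop both Pythons contain
-- (keys.index raising ValueError, and a blank slot, both return None)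
def pvCheck (keys : List String) (out : List String) : List String → Option String
  | [] => some (PySem.Str.join "\t" out)
  | nk :: rest =>
    match PySem.List.index? keys nk with
    | none => none
    | some i => if out.getD i "" = "" then none else pvCheck keys out rest

-- ===== PORT A =====
-- A's single loop: split each field and assign into output_lst as we go
def pvLoopA (keys : List String) : List String → List String → Option (List String)
  | out, [] => some out
  | out, f :: rest =>
    match PySem.Str.splitMax? f "=" 1 with
    | some [k, v] => pvLoopA keys (pvStep keys out k v) rest
    | _ => none        -- field without '=' : ValueError caught, return None

def process (line : String) (keys : List String) (not_blank_keys : List String) : Option String :=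
  match pvLoopA keys (List.replicate keys.length "") ((PySem.Str.split? line "`").getD []) with
  | none => none
  | some out => pvCheck keys out not_blank_keys

-- ===== PORT B =====
-- B's first loop: build the dict (last occurrence wins)
def pvBuild : List String → PySem.Dict String String → Option (PySem.Dict String String)
  | [], d => some d
  | f :: rest, d =>
    match PySem.Str.splitMax? f "=" 1 with
    | some [k, v] => pvBuild rest (d.insert k v)
    | _ => none        -- field without '=' : ValueError, return None

-- B's second loop: fill output_lst from d.items()
def pvAssignItems (keys : List String) : List String → List (String × String) → List String
  | out, [] => out
  | out, (k, v) :: rest => pvAssignItems keys (pvStep keys out k v) rest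

def process_alt (line : String) (keys : List String) (not_blank_keys : List String) : Option String :=
  match pvBuild ((PySem.Str.split? line "`").getD []) PySem.Dict.empty with
  | none => none
  | some d => pvCheck keys (pvAssignItems keys (List.replicate keys.length "") d.items) not_blank_keys

-- ===== PRECONDITION & SPEC =====
def Spec_process (line : String) (keys : List String) (not_blank_keys : List String) (out : Option String) : Prop := out = process_alt line keys not_blank_keys
instance (line : String) (keys : List String) (not_blank_keys : List String) (out : Option String) : Decidable (Spec_process line keys not_blank_keys out) := by unfold Spec_process; infer_instance

-- ===== CLAIM (what is proved, stated in full; the proofs are below) =====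
def Claim_equal_process : Prop := ∀ (line : String) (keys : List String) (not_blank_keys : List String), Dom_process line keys not_blank_keys → Spec_process line keys not_blank_keys (process line keys not_blank_keys)

-- ===== LEMMAS AND PROOFS =====

-- the step only depends on index?
lemma pvStep_eq (keys out : List String) (k v : String) :
    pvStep keys out k v = match PySem.List.index? keys k with
      | some i => out.set i v
      | none => out := by
  unfold pvStep
  by_cases h : k ∈ keys
  · rw [if_pos h]
  · rw [if_neg h, (PySem.List.index?_eq_none_iff keys k).mpr h]

-- distinct keys write distinct slots, so steps commute
lemma pvStep_comm (keys out : List String) (k v k' v' : String) (hne : k ≠ k') :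
    pvStep keys (pvStep keys out k v) k' v' = pvStep keys (pvStep keys out k' v') k v := by
  rw [pvStep_eq, pvStep_eq, pvStep_eq, pvStep_eq]
  cases hk : PySem.List.index? keys k with
  | none => simp
  | some i =>
    cases hk' : PySem.List.index? keys k' with
    | none => simp
    | some j =>
      have hij : i ≠ j := by
        intro h
        subst h
        obtain ⟨hi, hki, -⟩ := PySem.List.getElem_of_index?_eq_some hk
        obtain ⟨hj, hkj, -⟩ := PySem.List.getElem_of_index?_eq_some hk'
        exact hne (hki ▸ hkj ▸ rfl)
      exact List.set_comm v v' hij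

lemma pvStep_overwrite (keys out : List String) (k v0 v : String) :
    pvStep keys (pvStep keys out k v0) k v = pvStep keys out k v := by
  rw [pvStep_eq, pvStep_eq, pvStep_eq]
  cases hk : PySem.List.index? keys k with
  | none => rfl
  | some i => simp

-- a step for a key absent from the item list commutes through the whole list
lemma pvAssignItems_step_comm (keys : List String) (k v : String) :
    ∀ (l : List (String × String)) (out : List String), (∀ p ∈ l, p.1 ≠ k) →
    pvAssignItems keys (pvStep keys out k v) l = pvStep keys (pvAssignItems keys out l) k v := by
  intro l
  induction l with
  | nil => intro out _; rfl
  | cons p t ih =>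
    intro out h
    obtain ⟨k', v'⟩ := p
    have hne : k' ≠ k := h (k', v') (by simp)
    simp only [pvAssignItems]
    rw [pvStep_comm keys out k v k' v' (fun he => hne he.symm)]
    exact ih _ (fun q hq => h q (by simp [hq]))

lemma pvAssignItems_append (keys : List String) :
    ∀ (l1 l2 : List (String × String)) (out : List String),
    pvAssignItems keys out (l1 ++ l2) = pvAssignItems keys (pvAssignItems keys out l1) l2 := by
  intro l1
  induction l1 with
  | nil => intro l2 out; rfl
  | cons p t ih => intro l2 out; obtain ⟨k, v⟩ := p; simp only [List.cons_append, pvAssignItems, ih]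

-- replacing the (unique) pair with key k by (k, v) in the item list = doing the old
-- assignments and then the new one
lemma pvAssignItems_replace (keys : List String) (k v : String) :
    ∀ (l : List (String × String)) (out : List String), (l.map Prod.fst).Nodup → k ∈ l.map Prod.fst →
    pvAssignItems keys out (l.map (fun p => if p.1 == k then (k, v) else p))
      = pvStep keys (pvAssignItems keys out l) k v := by
  intro l
  induction l with
  | nil => intro out _ hm; simp at hm
  | cons p t ih =>
    intro out hnd hm
    obtain ⟨k', v'⟩ := p
    simp only [List.map_cons] at hnd hm
    by_cases hk : k' = k
    · subst hk
      have hnot : ∀ q ∈ t, q.1 ≠ k' := by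
        intro q hq he
        exact (List.nodup_cons.mp hnd).1 (he ▸ List.mem_map_of_mem hq)
      have htid : t.map (fun p => if p.1 == k' then (k', v) else p) = t := by
        conv_rhs => rw [← List.map_id t]
        apply List.map_congr_left
        intro q hq
        simp [hnot q hq]
      have hhead : (fun p => if p.1 == k' then (k', v) else p) ((k', v') : String × String) = (k', v) := by simp
      simp only [List.map_cons, htid, hhead, pvAssignItems]
      rw [pvAssignItems_step_comm keys k' v t _ hnot, pvAssignItems_step_comm keys k' v' t out hnot,
        pvStep_overwrite]
    · have hm' : k ∈ t.map Prod.fst := by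
        rcases List.mem_cons.mp hm with h | h
        · exact absurd h.symm hk
        · exact h
      have hhead : (fun p => if p.1 == k then (k, v) else p) ((k', v') : String × String) = (k', v') := by simp [hk]
      simp only [List.map_cons, hhead, pvAssignItems]
      exact ih _ hnd.of_cons hm'

-- the crux: applying the items of d.insert k v = applying d's items then one more step
lemma pvAssignItems_insert (keys out : List String) (d : PySem.Dict String String)
    (hnd : d.keys.Nodup) (k v : String) :
    pvAssignItems keys out (d.insert k v).items
      = pvStep keys (pvAssignItems keys out d.items) k v := by
  rw [PySem.Dict.items_insert]
  by_cases hc : d.contains k = true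
  · rw [if_pos hc]
    have hkeys : d.keys = d.items.map Prod.fst := rfl
    apply pvAssignItems_replace keys k v d.items out (hkeys ▸ hnd)
    have : k ∈ d.keys := (PySem.Dict.contains_iff_mem_keys d k).mp hc
    exact hkeys ▸ this
  · rw [if_neg hc]
    rw [pvAssignItems_append]
    rfl

-- main invariant: A's interleaved loop over the remaining fields, started from the output
-- produced by d's items, equals building the dict further and then applying its items
lemma pvLoop_eq_build (keys out : List String) :
    ∀ (fields : List String) (d : PySem.Dict String String), d.keys.Nodup →
    pvLoopA keys (pvAssignItems keys out d.items) fields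
      = (pvBuild fields d).map (fun d' => pvAssignItems keys out d'.items) := by
  intro fields
  induction fields with
  | nil => intro d _; rfl
  | cons f rest ih =>
    intro d hnd
    simp only [pvLoopA, pvBuild]
    cases hs : PySem.Str.splitMax? f "=" 1 with
    | none => rfl
    | some parts =>
      match parts with
      | [] => rfl
      | [k] => rfl
      | [k, v] =>
        show pvLoopA keys (pvStep keys (pvAssignItems keys out d.items) k v) rest
          = Option.map (fun d' => pvAssignItems keys out d'.items) (pvBuild rest (d.insert k v))
        rw [← pvAssignItems_insert keys out d hnd k v]
        exact ih (d.insert k v) (PySem.Dict.nodup_keys_insert d k v hnd)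
      | k :: v :: w :: t => rfl

-- ===== VERDICT (by name: the statement is the Claim_ definition above) =====
theorem process_spec : Claim_equal_process := by
  intro line keys not_blank_keys _
  unfold Spec_process process process_alt
  have h := pvLoop_eq_build keys (List.replicate keys.length "")
    ((PySem.Str.split? line "`").getD []) PySem.Dict.empty PySem.Dict.nodup_keys_empty
  have hemp : pvAssignItems keys (List.replicate keys.length "") PySem.Dict.empty.items
      = List.replicate keys.length "" := rfl
  rw [hemp] at h
  rw [h]
  cases pvBuild ((PySem.Str.split? line "`").getD []) PySem.Dict.empty with
  | none => rfl
  | some d => rfl
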